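-- pv_equiv track=rewrite | github.com/JakubBraz/adventofcode | 2025/day12.py | no_empty_space
-- ===== SOURCE A (Python) =====
-- def rotate(shape):
--     new_shape = create_board(len(shape[0]), len(shape))
--     for i in range(len(shape)):
--         for j in range(len(shape[0])):
--             new_shape[j][len(shape) - 1 - i] = shape[i][j]
--     return ["".join(row) for row in new_shape]
--
-- def no_empty_space(board):
--     for current in [board, rotate(board)]:
--         empty = False
--         for line in current:
--             line_empty = all(x == '.' for x in line)
--             if empty and not line_empty:
--                 return False
--             if line_empty:
--                 empty = True
--     return True
--
-- def create_board(i, j):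
--     return [['.'] * j for _ in range(i)]
-- ===== SOURCE B (Python) =====
-- def monotone(f):
--     return all(a <= b for a, b in zip(f, f[1:]))
--
-- def no_empty_space(board):
--     rowflags = [all(c == '.' for c in line) for line in board]
--     colflags = [all(line[j] == '.' for line in board) for j in range(len(board[0]))]
--     return monotone(rowflags) and monotone(colflags)
-- ===== Notes on version B (the rewrite author's own statement) =====
-- stated objective: simpler
-- what changed: B drops the rotate/create_board matrix construction entirely: it builds full row-emptiness and column-emptiness flag lists directly from the board and checks each whole list for monotonicity (no False after a True) via a pairwise zip, instead of A's stateful early-return scan over the board and its materialised rotation.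
import Mathlib
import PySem

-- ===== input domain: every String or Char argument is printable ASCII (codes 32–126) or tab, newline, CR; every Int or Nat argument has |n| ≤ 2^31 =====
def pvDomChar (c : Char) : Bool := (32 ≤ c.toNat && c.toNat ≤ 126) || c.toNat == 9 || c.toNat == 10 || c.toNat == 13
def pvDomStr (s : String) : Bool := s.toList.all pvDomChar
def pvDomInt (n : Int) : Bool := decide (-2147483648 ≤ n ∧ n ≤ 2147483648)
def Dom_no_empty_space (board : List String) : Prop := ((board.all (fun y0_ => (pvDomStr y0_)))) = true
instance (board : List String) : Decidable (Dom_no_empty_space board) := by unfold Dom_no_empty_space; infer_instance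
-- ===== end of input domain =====

-- B replaces A's materialised board rotation and stateful early-return scan by building the
-- row- and column-emptiness flag lists and checking each whole list for monotonicity (objective: simpler).

-- ===== PORT A =====
-- create_board(i, j) = [['.'] * j for _ in range(i)]
def create_board (i j : Nat) : List (List Char) :=
  (List.range i).map (fun _ => List.replicate j '.')

-- rotate(shape); the in-place writes new_shape[j][...] = shape[i][j] become List.set;
-- indexing shape[i] / shape[i][j] is in range under Pre_ and is ported with getD.
def rotate (shape : List String) : List String :=
  let h := shape.length
  let w := (shape.headD "").length      -- len(shape[0]); shape ≠ [] under Pre_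
  let new0 := create_board w h
  let new1 := (List.range h).foldl (fun ns i =>
    (List.range w).foldl (fun a j =>
      a.set j ((a.getD j []).set (h - 1 - i) ((shape.getD i "").toList.getD j '.'))) ns) new0
  new1.map (fun row => String.ofList row)   -- "".join(row)

-- the inner 'for line in current' loop with its 'empty' flag; 'some false' = early 'return False'
def scanLines : List String → Bool → Option Bool
  | [], _ => none
  | line :: rest, empty =>
    let line_empty := line.toList.all (fun x => x == '.')
    if empty && !line_empty then some false
    else scanLines rest (line_empty || empty)

-- the outer 'for current in [board, rotate(board)]' loop
def outerScan : List (List String) → Bool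
  | [] => true
  | cur :: rest =>
    match scanLines cur false with
    | some b => b
    | none => outerScan rest

def no_empty_space (board : List String) : Bool :=
  outerScan [board, rotate board]

-- ===== PORT B =====
-- monotone(f) = all(a <= b for a, b in zip(f, f[1:]));  f[1:] = tail, a <= b on bools = !a || b
def monoFlags (f : List Bool) : Bool :=
  (f.zip f.tail).all (fun p => !p.1 || p.2)

def no_empty_space_alt (board : List String) : Bool :=
  let rowflags := board.map (fun line => line.toList.all (fun c => c == '.'))
  let colflags := (List.range (board.headD "").length).map
    (fun j => board.all (fun line => line.toList.getD j '.' == '.'))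
  monoFlags rowflags && monoFlags colflags

-- ===== PRECONDITION & SPEC =====
-- Pre_ excludes exactly the inputs where Python A raises IndexError: the empty board
-- (len(board[0])) and boards with a line shorter than the first line (shape[i][j] in rotate).
def Pre_no_empty_space (board : List String) : Prop :=
  board ≠ [] ∧ ∀ line ∈ board, (board.headD "").toList.length ≤ line.toList.length
instance (board : List String) : Decidable (Pre_no_empty_space board) := by
  unfold Pre_no_empty_space; infer_instance

def pvWitness_no_empty_space : List String := ["#.", ".."]

def Spec_no_empty_space (board : List String) (out : Bool) : Prop := out = no_empty_space_alt board
instance (board : List String) (out : Bool) : Decidable (Spec_no_empty_space board out) := by unfold Spec_no_empty_space; infer_instance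

-- ===== CLAIM (what is proved, stated in full; the proofs are below) =====
def Claim_equal_no_empty_space : Prop := ∀ (board : List String), Dom_no_empty_space board → Pre_no_empty_space board → Spec_no_empty_space board (no_empty_space board)

-- ===== LEMMAS AND PROOFS =====

-- monotone check in head-recursive form, convenient for induction
def monoAux : List Bool → Bool
  | [] => true
  | [_] => true
  | a :: b :: l => (!a || b) && monoAux (b :: l)

lemma monoFlags_eq_monoAux : ∀ f, monoFlags f = monoAux f := by
  intro f
  induction f with
  | nil => rfl
  | cons a t ih =>
    cases t with
    | nil => rfl
    | cons b l =>
      simp only [monoFlags, monoAux, List.tail_cons, List.zip_cons_cons, List.all_cons] at *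
      rw [← ih]

lemma monoAux_false_cons (f : List Bool) : monoAux (false :: f) = monoAux f := by
  cases f <;> simp [monoAux]

-- the scan succeeds (no early return) iff the flag list, preceded by the running flag, is monotone
lemma scan_mono : ∀ (ls : List String) (e : Bool),
    (scanLines ls e).isNone
      = monoAux (e :: ls.map (fun line => line.toList.all (fun x => x == '.'))) := by
  intro ls
  induction ls with
  | nil => intro e; simp [scanLines, monoAux]
  | cons line rest ih =>
    intro e
    simp only [scanLines, List.map_cons]
    set a := line.toList.all (fun x => x == '.') with ha
    cases e <;> cases a <;>
      simp_all [monoAux, monoAux_false_cons]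

lemma scan_none_or_false : ∀ (ls : List String) (e : Bool),
    scanLines ls e = none ∨ scanLines ls e = some false := by
  intro ls
  induction ls with
  | nil => intro e; left; rfl
  | cons line rest ih =>
    intro e
    simp only [scanLines]
    split
    · right; rfl
    · exact ih _

lemma foldl_set_length {α : Type} (v : Nat → List α → List α) :
    ∀ (xs : List Nat) (ns : List (List α)),
      (xs.foldl (fun a j => a.set j (v j (a.getD j []))) ns).length = ns.length := by
  intro xs
  induction xs with
  | nil => intro ns; rfl
  | cons x t ih => intro ns; rw [List.foldl_cons, ih, List.length_set]

-- the inner fold sets index j to v j (old value at j), for every j < w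
lemma inner_getD {α : Type} (v : Nat → List α → List α) :
    ∀ (w : Nat) (ns : List (List α)) (k : Nat), w ≤ ns.length →
      ((List.range w).foldl (fun a j => a.set j (v j (a.getD j []))) ns).getD k []
        = if k < w then v k (ns.getD k []) else ns.getD k [] := by
  intro w
  induction w with
  | zero => intro ns k _; simp
  | succ w ih =>
    intro ns k hw
    rw [List.range_succ, List.foldl_append]
    simp only [List.foldl_cons, List.foldl_nil]
    have hlen : ((List.range w).foldl (fun a j => a.set j (v j (a.getD j []))) ns).length
        = ns.length := foldl_set_length v _ ns
    have hW : ((List.range w).foldl (fun a j => a.set j (v j (a.getD j []))) ns).getD w []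
        = ns.getD w [] := by
      rw [ih ns w (by omega)]; simp
    rw [hW]
    rcases Nat.lt_trichotomy k w with h | h | h
    · rw [List.getD_eq_getElem?_getD, List.getElem?_set_ne (by omega),
        ← List.getD_eq_getElem?_getD, ih ns k (by omega)]
      simp [h, Nat.lt_succ_of_lt h]
    · subst h
      rw [List.getD_eq_getElem?_getD, List.getElem?_set_self (by omega)]
      simp
    · rw [List.getD_eq_getElem?_getD, List.getElem?_set_ne (by omega),
        ← List.getD_eq_getElem?_getD, ih ns k (by omega)]
      rw [if_neg (show ¬ k < w by omega), if_neg (show ¬ k < w + 1 by omega)]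

-- abbreviation for A's entry shape[i][j] (with getD defaults)
def entry (shape : List String) (i j : Nat) : Char :=
  (shape.getD i "").toList.getD j '.'

-- state after m outer iterations of rotate's double loop
def rotState (shape : List String) (w h m : Nat) : List (List Char) :=
  (List.range m).foldl (fun ns i =>
    (List.range w).foldl (fun a j =>
      a.set j ((a.getD j []).set (h - 1 - i) (entry shape i j))) ns) (create_board w h)

lemma rotState_succ (shape : List String) (w h m : Nat) :
    rotState shape w h (m + 1)
      = (List.range w).foldl (fun a j =>
          a.set j ((a.getD j []).set (h - 1 - m) (entry shape m j))) (rotState shape w h m) := by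
  unfold rotState
  rw [List.range_succ, List.foldl_append, List.foldl_cons, List.foldl_nil]

lemma rotState_zero (shape : List String) (w h : Nat) :
    rotState shape w h 0 = create_board w h := by
  simp [rotState]

lemma rotState_length (shape : List String) (w h : Nat) :
    ∀ m, (rotState shape w h m).length = w := by
  intro m
  induction m with
  | zero => simp [rotState, create_board]
  | succ m ih =>
    rw [rotState_succ]
    exact (foldl_set_length (fun j r => r.set (h - 1 - m) (entry shape m j))
      (List.range w) _).trans ih

lemma create_board_getD (w h j : Nat) :
    (create_board w h).getD j [] = if j < w then List.replicate h '.' else [] := by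
  unfold create_board
  by_cases hj : j < w
  · rw [List.getD_eq_getElem?_getD, List.getElem?_map, List.getElem?_range hj]
    simp [hj]
  · have : (List.range w)[j]? = none := by
      rw [List.getElem?_eq_none_iff]; simpa using hj
    rw [List.getD_eq_getElem?_getD, List.getElem?_map, this]
    simp [hj]

lemma replicate_getD (h k : Nat) : (List.replicate h '.').getD k '.' = '.' := by
  by_cases hk : k < h <;>
    simp [List.getD_eq_getElem?_getD, List.getElem?_replicate, hk]

lemma rotState_row_length (shape : List String) (w h : Nat) :
    ∀ m j, j < w → ((rotState shape w h m).getD j []).length = h := by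
  intro m
  induction m with
  | zero =>
    intro j hj
    rw [rotState_zero, create_board_getD, if_pos hj, List.length_replicate]
  | succ m ih =>
    intro j hj
    rw [rotState_succ,
      inner_getD (fun j r => r.set (h - 1 - m) (entry shape m j)) w _ j
        (by rw [rotState_length])]
    rw [if_pos hj, List.length_set]
    exact ih j hj

-- entrywise characterization of the fold: cell (j,k) holds shape[h-1-k][j] once row h-1-k was written
lemma rotState_getD (shape : List String) (w h : Nat) :
    ∀ m, m ≤ h → ∀ j k,
      ((rotState shape w h m).getD j []).getD k '.'
        = if j < w ∧ h - m ≤ k ∧ k < h then entry shape (h - 1 - k) j else '.' := by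
  intro m
  induction m with
  | zero =>
    intro _ j k
    rw [rotState_zero, create_board_getD]
    have hno : ¬ (j < w ∧ h - 0 ≤ k ∧ k < h) := by omega
    rw [if_neg hno]
    by_cases hj : j < w
    · rw [if_pos hj, replicate_getD]
    · rw [if_neg hj]; rfl
  | succ m ih =>
    intro hm j k
    rw [rotState_succ,
      inner_getD (fun j r => r.set (h - 1 - m) (entry shape m j)) w _ j
        (by rw [rotState_length])]
    have hrow := ih (by omega) j
    by_cases hj : j < w
    · rw [if_pos hj]
      have hlenrow : ((rotState shape w h m).getD j []).length = h :=
        rotState_row_length shape w h m j hj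
      rw [List.getD_eq_getElem?_getD]
      by_cases hk : k = h - 1 - m
      · subst hk
        rw [List.getElem?_set_self (by rw [hlenrow]; omega)]
        have h1 : h - 1 - (h - 1 - m) = m := by omega
        have h2 : j < w ∧ h - (m + 1) ≤ h - 1 - m ∧ h - 1 - m < h := ⟨hj, by omega, by omega⟩
        rw [if_pos h2, h1]
        rfl
      · rw [List.getElem?_set_ne (by omega), ← List.getD_eq_getElem?_getD, hrow k]
        have hiff : (j < w ∧ h - m ≤ k ∧ k < h) ↔ (j < w ∧ h - (m + 1) ≤ k ∧ k < h) := by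
          omega
        rw [if_congr hiff rfl rfl]
    · rw [if_neg hj, hrow k]
      have : ¬ (j < w ∧ h - m ≤ k ∧ k < h) := by tauto
      have h2 : ¬ (j < w ∧ h - (m + 1) ≤ k ∧ k < h) := by tauto
      rw [if_neg this, if_neg h2]

lemma map_getD_range {α : Type} (l : List α) (d : α) :
    (List.range l.length).map (fun i => l.getD i d) = l := by
  apply List.ext_getElem
  · simp
  · intro i h1 h2
    simp [List.getD_eq_getElem?_getD, List.getElem?_eq_getElem h2]

-- rotate board, row by row: row j is column j of the board, reversed
lemma rotate_eq (board : List String) :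
    rotate board
      = (List.range (board.headD "").length).map (fun j =>
          String.ofList (((List.range board.length).map (fun i => entry board i j)).reverse)) := by
  have hS : ∀ w h, w = (board.headD "").length → h = board.length →
      rotState board w h h
        = (List.range w).map
            (fun j => ((List.range h).map (fun i => entry board i j)).reverse) := by
    intro w h _ _
    apply List.ext_getElem
    · rw [rotState_length]; simp
    · intro j hj1 hj2
      rw [rotState_length] at hj1
      rw [List.getElem_map, List.getElem_range]
      have hjel : (rotState board w h h).getD j [] = (rotState board w h h)[j] := by
        rw [List.getD_eq_getElem?_getD,
          List.getElem?_eq_getElem (show j < (rotState board w h h).length by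
            rw [rotState_length]; exact hj1)]
        rfl
      rw [← hjel]
      have hrl : ((rotState board w h h).getD j []).length = h :=
        rotState_row_length board w h h j hj1
      apply List.ext_getElem
      · rw [hrl]; simp
      · intro k hk1 hk2
        rw [hrl] at hk1
        have hkel : ((rotState board w h h).getD j []).getD k '.'
            = ((rotState board w h h).getD j [])[k] := by
          rw [List.getD_eq_getElem?_getD, List.getElem?_eq_getElem (by rw [hrl]; exact hk1)]
          rfl
        rw [← hkel, rotState_getD board w h h (le_refl h) j k,
          if_pos ⟨hj1, by omega, hk1⟩, List.getElem_reverse, List.getElem_map,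
          List.getElem_range]
        congr 1
        simp
  show ((rotState board (board.headD "").length board.length board.length).map
      fun row => String.ofList row) = _
  rw [hS _ _ rfl rfl, List.map_map]
  rfl

-- A's verdict for one pass equals monotonicity of that pass's flag list
lemma scan_false_eq_mono (ls : List String) :
    (scanLines ls false).isNone
      = monoFlags (ls.map (fun line => line.toList.all (fun x => x == '.'))) := by
  rw [scan_mono, monoAux_false_cons, monoFlags_eq_monoAux]

-- ===== VERDICT (by name: the statement is the Claim_ definition above) =====
theorem no_empty_space_spec : Claim_equal_no_empty_space := by
  intro board _ _
  show no_empty_space board = no_empty_space_alt board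
  have hA : no_empty_space board
      = ((scanLines board false).isNone && (scanLines (rotate board) false).isNone) := by
    unfold no_empty_space outerScan
    rcases scan_none_or_false board false with h1 | h1 <;>
      rcases scan_none_or_false (rotate board) false with h2 | h2 <;>
        simp [h1, h2, outerScan]
  rw [hA, scan_false_eq_mono, scan_false_eq_mono]
  simp only [no_empty_space_alt]
  congr 1
  rw [rotate_eq, List.map_map]
  congr 1
  apply List.map_congr_left
  intro j hj
  simp only [Function.comp_apply, String.toList_ofList, List.all_reverse]
  have hcol : (List.range board.length).map (fun i => entry board i j)
      = ((List.range board.length).map (fun i => board.getD i "")).map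
          (fun line => line.toList.getD j '.') := by
    rw [List.map_map]; rfl
  rw [hcol, map_getD_range, List.all_map]
  rfl
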